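-- pv_equiv track=rewrite | github.com/funkyidol6/Boolean-evaluator | main.py | colonize
-- ===== SOURCE A (Python) =====
-- def colonize(array:list[str]):
--     t = [[j[i] for j in array] for i in range(len(array[0]))]
--     t = [list(set(i)) for i in t]
--     a = []
--     for idx,i in enumerate(t):
--         if i == ['1'] or i == ['0']:
--             boo = True
--             if i == ['0']:
--                 boo = False
--             a.append((idx,boo))
--     return a
-- ===== SOURCE B (Python) =====
-- def colonize(array: list[str]):
--     result = []
--     for i in range(len(array[0])):
--         c = array[0][i]
--         if c in ('0', '1') and all(row[i] == c for row in array):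
--             result.append((i, c == '1'))
--     return result
-- ===== Notes on version B (the rewrite author's own statement) =====
-- stated objective: simpler
-- what changed: Replaced the three-pass transpose-then-set-dedupe-then-enumerate pipeline by a single direct scan over column indices that compares each column entry to the column's first character, building no intermediate lists.
import Mathlib
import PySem

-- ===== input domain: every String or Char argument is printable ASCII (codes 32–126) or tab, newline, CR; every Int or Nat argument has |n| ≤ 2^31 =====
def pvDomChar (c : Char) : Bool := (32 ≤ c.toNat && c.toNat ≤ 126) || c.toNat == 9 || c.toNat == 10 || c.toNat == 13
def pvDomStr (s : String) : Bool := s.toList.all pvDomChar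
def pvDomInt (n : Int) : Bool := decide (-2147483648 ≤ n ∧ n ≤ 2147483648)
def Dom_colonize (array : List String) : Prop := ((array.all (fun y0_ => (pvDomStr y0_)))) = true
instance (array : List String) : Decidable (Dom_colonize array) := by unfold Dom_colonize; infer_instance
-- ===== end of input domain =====

-- B replaces A's transpose-then-set-dedupe-then-enumerate pipeline by one direct scan over
-- column indices (simpler, same cost).

-- ===== PORT A =====
def colonize (array : List String) : List (Int × Bool) :=
  let t : List (List Char) :=
    (PySem.List.pyRange 0 (PySem.Str.len (PySem.List.pyGetD array 0 "")) 1).map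
      (fun i => array.map (fun j => PySem.List.pyGetD j.toList i 'x'))
  let t2 : List (List Char) := t.map (fun i => PySem.Set.ofList i)
  (PySem.List.enumerate t2 0).foldl
    (fun a p =>
      if p.2 = ['1'] ∨ p.2 = ['0'] then
        a ++ [(p.1, if p.2 = ['0'] then false else true)]
      else a) []

-- ===== PORT B =====
def colonize_alt (array : List String) : List (Int × Bool) :=
  let row0 : List Char := (PySem.List.pyGetD array 0 "").toList
  (PySem.List.pyRange 0 (PySem.Chars.len row0) 1).foldl
    (fun res i =>
      let c := PySem.List.pyGetD row0 i 'x'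
      if (c = '0' ∨ c = '1') ∧ array.all (fun row => PySem.List.pyGetD row.toList i 'x' == c)
      then res ++ [(i, c == '1')] else res) []

-- ===== PRECONDITION & SPEC =====
-- Pre_ excludes exactly the inputs on which Python A raises IndexError:
-- the empty list (array[0]) and ragged inputs with a row shorter than row 0 (j[i]).
def Pre_colonize (array : List String) : Prop :=
  array ≠ [] ∧ ∀ s ∈ array, (PySem.List.pyGetD array 0 "").toList.length ≤ s.toList.length
instance (array : List String) : Decidable (Pre_colonize array) := by unfold Pre_colonize; infer_instance
def pvWitness_colonize : List String := (["10", "11"])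
def Spec_colonize (array : List String) (out : List (Int × Bool)) : Prop := out = colonize_alt array
instance (array : List String) (out : List (Int × Bool)) : Decidable (Spec_colonize array out) := by unfold Spec_colonize; infer_instance

-- ===== CLAIM (what is proved, stated in full; the proofs are below) =====
def Claim_equal_colonize : Prop := ∀ (array : List String), Dom_colonize array → Pre_colonize array → Spec_colonize array (colonize array)

-- ===== LEMMAS AND PROOFS =====

-- helper: folding Set.add over a constant list keeps the singleton
lemma foldl_add_const {c : Char} : ∀ (xs : List Char), (∀ x ∈ xs, x = c) →
    List.foldl PySem.Set.add [c] xs = [c] := by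
  intro xs
  induction xs with
  | nil => intro _; rfl
  | cons y ys ih =>
    intro h
    have hy : y = c := h y (by simp)
    subst hy
    simp only [List.foldl_cons]
    have hadd : PySem.Set.add [y] y = [y] := by
      simp [PySem.Set.add, PySem.Set.contains]
    rw [hadd]
    exact ih (fun x hx => h x (by simp [hx]))

-- set(l) = {c}  ↔  l nonempty and constantly c
lemma ofList_singleton_iff {c : Char} (l : List Char) :
    PySem.Set.ofList l = [c] ↔ l ≠ [] ∧ ∀ x ∈ l, x = c := by
  constructor
  · intro h
    refine ⟨?_, ?_⟩
    · intro hnil; subst hnil; simp [PySem.Set.ofList] at h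
    · intro x hx
      have hx' : x ∈ PySem.Set.ofList l := by
        rw [PySem.Set.mem_ofList]; exact hx
      rw [h] at hx'; simpa using hx'
  · rintro ⟨hne, hall⟩
    match l, hne with
    | y :: ys, _ =>
      have hy : y = c := hall y (by simp)
      subst hy
      show List.foldl PySem.Set.add [] (y :: ys) = [y]
      simp only [List.foldl_cons]
      have hadd : PySem.Set.add [] y = [y] := by
        simp [PySem.Set.add, PySem.Set.contains]
      rw [hadd]
      exact foldl_add_const ys (fun x hx => hall x (by simp [hx]))

-- enumerate over a range-built list pairs each index with its value
lemma enum_range_map {α : Type} (f : Nat → α) : ∀ (m : Nat),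
    PySem.List.enumerate ((List.range m).map f) 0 = (List.range m).map (fun (k : Nat) => ((k : Int), f k)) := by
  intro m
  induction m with
  | zero => rfl
  | succ n ih =>
    rw [List.range_succ, List.map_append, List.map_append,
        PySem.List.enumerate_append, ih]
    simp [PySem.List.enumerate]

-- the per-column guards of A and B are equivalent, and pick the same boolean
lemma cond_iff (r : String) (rest : List String) (i : Int) :
    (PySem.Set.ofList ((r :: rest).map (fun j => PySem.List.pyGetD j.toList i 'x')) = ['1'] ∨
     PySem.Set.ofList ((r :: rest).map (fun j => PySem.List.pyGetD j.toList i 'x')) = ['0'])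
    ↔ ((PySem.List.pyGetD r.toList i 'x' = '0' ∨ PySem.List.pyGetD r.toList i 'x' = '1') ∧
       ∀ j ∈ r :: rest, PySem.List.pyGetD j.toList i 'x' = PySem.List.pyGetD r.toList i 'x') := by
  have hmap : ∀ d : Char,
      (∀ x ∈ (r :: rest).map (fun j => PySem.List.pyGetD j.toList i 'x'), x = d) ↔
      (∀ j ∈ r :: rest, PySem.List.pyGetD j.toList i 'x' = d) := by
    intro d; simp
  constructor
  · rintro (h | h)
    · obtain ⟨-, hall⟩ := (ofList_singleton_iff _).1 h
      have hall' := (hmap '1').1 hall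
      have hc : PySem.List.pyGetD r.toList i 'x' = '1' := hall' r (by simp)
      exact ⟨Or.inr hc, fun j hj => by rw [hall' j hj, hc]⟩
    · obtain ⟨-, hall⟩ := (ofList_singleton_iff _).1 h
      have hall' := (hmap '0').1 hall
      have hc : PySem.List.pyGetD r.toList i 'x' = '0' := hall' r (by simp)
      exact ⟨Or.inl hc, fun j hj => by rw [hall' j hj, hc]⟩
  · rintro ⟨hc | hc, hall⟩
    · right
      exact (ofList_singleton_iff _).2 ⟨by simp, (hmap '0').2 (fun j hj => by rw [hall j hj, hc])⟩
    · left
      exact (ofList_singleton_iff _).2 ⟨by simp, (hmap '1').2 (fun j hj => by rw [hall j hj, hc])⟩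

theorem colonize_spec : Claim_equal_colonize := by
  intro array _hdom hpre
  obtain ⟨hne, -⟩ := hpre
  obtain ⟨r, rest, rfl⟩ : ∃ r rest, array = r :: rest := by
    cases array with
    | nil => exact absurd rfl hne
    | cons r rest => exact ⟨r, rest, rfl⟩
  unfold Spec_colonize colonize colonize_alt
  simp only [PySem.List.pyGetD_zero_cons, PySem.Str.len_eq, PySem.Chars.len_eq]
  rw [PySem.List.pyRange_one]
  simp only [Int.sub_zero, Int.toNat_natCast, List.map_map, List.foldl_map, Function.comp_def, zero_add]
  rw [enum_range_map, List.foldl_map]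
  apply PySem.List.foldl_congr_mem
  intro a k _
  by_cases hA : (PySem.Set.ofList ((r :: rest).map (fun j => PySem.List.pyGetD j.toList (k : Int) 'x')) = ['1'] ∨
       PySem.Set.ofList ((r :: rest).map (fun j => PySem.List.pyGetD j.toList (k : Int) 'x')) = ['0'])
  · have hB := (cond_iff r rest (k : Int)).1 hA
    have hBall : ((r :: rest).all fun row =>
        PySem.List.pyGetD row.toList (k : Int) 'x' == PySem.List.pyGetD r.toList (k : Int) 'x') = true := by
      simp only [List.all_eq_true, beq_iff_eq]
      exact hB.2
    have hcond : (PySem.List.pyGetD r.toList (k : Int) 'x' = '0' ∨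
        PySem.List.pyGetD r.toList (k : Int) 'x' = '1') ∧
        ((r :: rest).all fun row =>
          PySem.List.pyGetD row.toList (k : Int) 'x' == PySem.List.pyGetD r.toList (k : Int) 'x') = true :=
      ⟨hB.1, hBall⟩
    rw [if_pos hA, if_pos hcond]
    rcases hB.1 with hc | hc
    · have h0 : PySem.Set.ofList ((r :: rest).map (fun j => PySem.List.pyGetD j.toList (k : Int) 'x')) = ['0'] := by
        refine (ofList_singleton_iff _).2 ⟨by simp, ?_⟩
        simp only [List.mem_map]
        rintro x ⟨j, hj, rfl⟩
        rw [hB.2 j hj, hc]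
      rw [if_pos h0]
      simp [hc]
    · have h1 : PySem.Set.ofList ((r :: rest).map (fun j => PySem.List.pyGetD j.toList (k : Int) 'x')) ≠ ['0'] := by
        intro h0
        obtain ⟨-, hall⟩ := (ofList_singleton_iff _).1 h0
        have hx := hall (PySem.List.pyGetD r.toList (k : Int) 'x') (by simp)
        rw [hc] at hx
        exact absurd hx (by decide)
      rw [if_neg h1]
      simp [hc]
  · rw [if_neg hA, if_neg ?_]
    intro hB
    apply hA
    apply (cond_iff r rest (k : Int)).2
    refine ⟨hB.1, ?_⟩
    have hall := hB.2
    simp only [List.all_eq_true, beq_iff_eq] at hall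
    exact hall
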